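-- pv_equiv track=rewrite | github.com/pypi-data/pypi-mirror-354 | packages/tableswift/tableswift-0.1.4-py3-none-any.whl/tableswift/utils/data_utils.py | sort_list_pairs
-- ===== SOURCE A (Python) =====
-- def sort_list_pairs(pair1, pair2, pair3):
--     # Unpack the pairs into separate lists
--     list1a, list1b = pair1
--     list2a, list2b = pair2
--     list3a, list3b = pair3
--
--     # Determine the sorting order based on the second lists
--     sort_order = sorted(range(len(list1b)), key=lambda i: (list1b[i], list2b[i], list3b[i]))
--
--     # Sort each first list based on the determined sort order
--     sorted_list1a = [list1a[i] for i in sort_order]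
--     sorted_list2a = [list2a[i] for i in sort_order]
--     sorted_list3a = [list3a[i] for i in sort_order]
--
--     # Sort the second lists to make them identical
--     sorted_list1b = sorted(list1b)
--     sorted_list2b = sorted(list2b)
--     sorted_list3b = sorted(list3b)
--
--     # Return the sorted pairs
--     return (sorted_list1a, sorted_list1b), (sorted_list2a, sorted_list2b), (sorted_list3a, sorted_list3b)
-- ===== SOURCE B (Python) =====
-- def sort_list_pairs(pair1, pair2, pair3):
--     list1a, list1b = pair1
--     list2a, list2b = pair2
--     list3a, list3b = pair3
--
--     # Group the rows by their composite b-key (first-occurrence order in the dict),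
--     # then emit the groups in sorted key order; within a group original order is kept,
--     # which reproduces the stable sort without ever sorting the full rows.
--     groups = {}
--     for i in range(len(list1b)):
--         key = (list1b[i], list2b[i], list3b[i])
--         groups.setdefault(key, []).append((list1a[i], list2a[i], list3a[i]))
--
--     s1a, s2a, s3a = [], [], []
--     for key in sorted(groups):
--         for a1, a2, a3 in groups[key]:
--             s1a.append(a1)
--             s2a.append(a2)
--             s3a.append(a3)
--
--     return (s1a, sorted(list1b)), (s2a, sorted(list2b)), (s3a, sorted(list3b))
-- ===== Notes on version B (the rewrite author's own statement) =====
-- stated objective: alternative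
-- what changed: Replaces A's stable sort of the full index list by a one-pass hash grouping: rows are bucketed in a dict keyed by the (b1,b2,b3) triple, only the distinct keys are sorted, and the output columns are emitted group by group in key order (original order inside a group reproduces stability); sorted(list1b/2b/3b) stay as in A.
import Mathlib
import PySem

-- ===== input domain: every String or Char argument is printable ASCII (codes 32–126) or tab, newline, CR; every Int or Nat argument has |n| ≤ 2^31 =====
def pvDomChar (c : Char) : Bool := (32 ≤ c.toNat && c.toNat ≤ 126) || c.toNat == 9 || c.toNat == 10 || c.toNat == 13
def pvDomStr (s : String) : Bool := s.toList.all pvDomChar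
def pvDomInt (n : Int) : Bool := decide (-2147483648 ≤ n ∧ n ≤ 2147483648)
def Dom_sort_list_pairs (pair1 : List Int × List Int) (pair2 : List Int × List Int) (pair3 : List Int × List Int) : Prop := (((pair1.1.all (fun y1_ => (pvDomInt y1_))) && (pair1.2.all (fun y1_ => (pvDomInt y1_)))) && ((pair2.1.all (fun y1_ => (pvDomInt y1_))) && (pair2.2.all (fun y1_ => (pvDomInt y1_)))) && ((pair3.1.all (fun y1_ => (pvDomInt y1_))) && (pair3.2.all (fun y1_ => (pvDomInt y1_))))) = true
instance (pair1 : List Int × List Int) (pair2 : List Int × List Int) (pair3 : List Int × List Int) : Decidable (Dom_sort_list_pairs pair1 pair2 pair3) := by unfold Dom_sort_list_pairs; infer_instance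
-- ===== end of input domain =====

-- B replaces A's stable sort of the whole index list by a dict that GROUPS the rows by their
-- (b1,b2,b3) key triple in one pass, sorts only the DISTINCT keys, and emits the groups in key
-- order (original order inside a group gives the stability A gets from its sort); objective: alternative.

-- ===== PORT A =====
def sort_list_pairs (pair1 : List Int × List Int) (pair2 : List Int × List Int) (pair3 : List Int × List Int) : (List Int × List Int) × (List Int × List Int) × (List Int × List Int) :=
  let list1a := pair1.1
  let list1b := pair1.2
  let list2a := pair2.1
  let list2b := pair2.2
  let list3a := pair3.1
  let list3b := pair3.2
  -- sorted(range(len(list1b)), key=lambda i: (list1b[i], list2b[i], list3b[i]))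
  -- the tuple key is ported as a 3-element List Int under lexicographic list order, which is
  -- exactly Python's tuple comparison for Int triples; out-of-range indexing (IndexError) is excluded by Pre_
  let sort_order := PySem.List.sorted (PySem.List.pyRange 0 (PySem.List.len list1b))
      (fun i => [PySem.List.pyGetD list1b i 0, PySem.List.pyGetD list2b i 0, PySem.List.pyGetD list3b i 0])
  let sorted_list1a := sort_order.map (fun i => PySem.List.pyGetD list1a i 0)
  let sorted_list2a := sort_order.map (fun i => PySem.List.pyGetD list2a i 0)
  let sorted_list3a := sort_order.map (fun i => PySem.List.pyGetD list3a i 0)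
  let sorted_list1b := PySem.List.sorted list1b (fun x => x)
  let sorted_list2b := PySem.List.sorted list2b (fun x => x)
  let sorted_list3b := PySem.List.sorted list3b (fun x => x)
  ((sorted_list1a, sorted_list1b), (sorted_list2a, sorted_list2b), (sorted_list3a, sorted_list3b))

-- ===== PORT B =====
def sort_list_pairs_alt (pair1 : List Int × List Int) (pair2 : List Int × List Int) (pair3 : List Int × List Int) : (List Int × List Int) × (List Int × List Int) × (List Int × List Int) :=
  let list1a := pair1.1
  let list1b := pair1.2
  let list2a := pair2.1
  let list2b := pair2.2
  let list3a := pair3.1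
  let list3b := pair3.2
  -- for i in range(len(list1b)): groups.setdefault(key, []).append(triple) — the setdefault/append
  -- pair is exactly d[key] = d.get(key, []) + [triple], i.e. Dict.modify key [] (· ++ [triple]);
  -- the tuple key is the 3-element List Int under lexicographic order (= Python tuple comparison)
  let groups := (PySem.List.pyRange 0 (PySem.List.len list1b)).foldl
      (fun d i => d.modify
        [PySem.List.pyGetD list1b i 0, PySem.List.pyGetD list2b i 0, PySem.List.pyGetD list3b i 0] []
        (· ++ [(PySem.List.pyGetD list1a i 0, PySem.List.pyGetD list2a i 0, PySem.List.pyGetD list3a i 0)]))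
      PySem.Dict.empty
  -- for key in sorted(groups): for (a1, a2, a3) in groups[key]: append to the three output columns
  let s := (PySem.List.sorted (PySem.Dict.keys groups) (fun x => x)).foldl
      (fun (acc : List Int × List Int × List Int) k =>
        (groups.getD k []).foldl
          (fun acc t => (acc.1 ++ [t.1], acc.2.1 ++ [t.2.1], acc.2.2 ++ [t.2.2])) acc)
      ([], [], [])
  ((s.1, PySem.List.sorted list1b (fun x => x)),
   (s.2.1, PySem.List.sorted list2b (fun x => x)),
   (s.2.2, PySem.List.sorted list3b (fun x => x)))

-- ===== PRECONDITION & SPEC =====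
-- Pre_ excludes exactly the ragged inputs on which A raises IndexError: some list shorter than
-- list1b gets indexed by an i < len(list1b).
def Pre_sort_list_pairs (pair1 : List Int × List Int) (pair2 : List Int × List Int) (pair3 : List Int × List Int) : Prop :=
  pair1.2.length ≤ pair1.1.length ∧ pair1.2.length ≤ pair2.1.length ∧ pair1.2.length ≤ pair3.1.length ∧
  pair1.2.length ≤ pair2.2.length ∧ pair1.2.length ≤ pair3.2.length
instance (pair1 : List Int × List Int) (pair2 : List Int × List Int) (pair3 : List Int × List Int) : Decidable (Pre_sort_list_pairs pair1 pair2 pair3) := by unfold Pre_sort_list_pairs; infer_instance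
def pvWitness_sort_list_pairs : (List Int × List Int) × (List Int × List Int) × (List Int × List Int) :=
  (([1, 2], [3, 1]), ([4, 5], [2, 2]), ([6, 7], [0, 9]))

def Spec_sort_list_pairs (pair1 : List Int × List Int) (pair2 : List Int × List Int) (pair3 : List Int × List Int) (out : (List Int × List Int) × (List Int × List Int) × (List Int × List Int)) : Prop := out = sort_list_pairs_alt pair1 pair2 pair3
instance (pair1 : List Int × List Int) (pair2 : List Int × List Int) (pair3 : List Int × List Int) (out : (List Int × List Int) × (List Int × List Int) × (List Int × List Int)) : Decidable (Spec_sort_list_pairs pair1 pair2 pair3 out) := by unfold Spec_sort_list_pairs; infer_instance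

-- ===== CLAIM (what is proved, stated in full; the proofs are below) =====
def Claim_equal_sort_list_pairs : Prop := ∀ (pair1 : List Int × List Int) (pair2 : List Int × List Int) (pair3 : List Int × List Int), Dom_sort_list_pairs pair1 pair2 pair3 → Pre_sort_list_pairs pair1 pair2 pair3 → Spec_sort_list_pairs pair1 pair2 pair3 (sort_list_pairs pair1 pair2 pair3)

-- ===== LEMMAS AND PROOFS =====

-- insertBy passes over a prefix it does not insert into
theorem pv_insertBy_skip {a : Type} (bef : a → a → Bool) (x : a) (p s : List a)
    (h : ∀ y ∈ p, bef x y = false) :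
    PySem.List.insertBy bef x (p ++ s) = p ++ PySem.List.insertBy bef x s := by
  induction p with
  | nil => simp
  | cons y ys ih =>
      have hy := h y (by simp)
      simp only [List.cons_append, PySem.List.insertBy, hy, Bool.false_eq_true, if_false]
      rw [ih (fun z hz => h z (by simp [hz]))]

theorem pv_insertBy_front {a : Type} (bef : a → a → Bool) (x : a) (ys : List a)
    (h : ∀ y ∈ ys, bef x y = true) :
    PySem.List.insertBy bef x ys = x :: ys := by
  cases ys with
  | nil => rfl
  | cons y t => simp [PySem.List.insertBy, h y (by simp)]

theorem pv_sorted_append_singleton {a k : Type} [LT k] [DecidableLT k] (m : List a) (x : a) (key : a → k) :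
    PySem.List.sorted (m ++ [x]) key =
      PySem.List.insertBy (fun u v => decide (key u < key v)) x (PySem.List.sorted m key) := by
  rw [PySem.List.sorted_eq_foldl_insertBy, PySem.List.sorted_eq_foldl_insertBy, List.foldl_append]
  rfl

-- core's List.lt on Int lists is Mathlib's lexicographic < (the LinearOrder's strict order)
theorem pv_listlt_iff (a b : List Int) :
    @LT.lt (List Int) List.instLT a b ↔ @LT.lt (List Int) Preorder.toLT a b :=
  List.lt_iff_lex_lt a b

theorem pv_lt_irrefl (a : List Int) : ¬ a < a := fun h => lt_irrefl a ((pv_listlt_iff a a).mp h)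

theorem pv_lt_asymm {a b : List Int} (h : a < b) : ¬ b < a :=
  fun h' => lt_asymm ((pv_listlt_iff a b).mp h) ((pv_listlt_iff b a).mp h')

theorem pv_lt_trans {a b c : List Int} (h1 : a < b) (h2 : b < c) : a < c :=
  (pv_listlt_iff a c).mpr (lt_trans ((pv_listlt_iff a b).mp h1) ((pv_listlt_iff b c).mp h2))

theorem pv_lt_total {a b : List Int} (h : a ≠ b) : a < b ∨ b < a := by
  rcases lt_or_gt_of_ne h with h' | h'
  · exact Or.inl ((pv_listlt_iff a b).mpr h')
  · exact Or.inr ((pv_listlt_iff b a).mpr h')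

-- flatMap congruence on the members
theorem pv_flatMap_congr {a b : Type} {l : List a} {f g : a → List b}
    (h : ∀ x ∈ l, f x = g x) : l.flatMap f = l.flatMap g := by
  induction l with
  | nil => rfl
  | cons x xs ih =>
      simp only [List.flatMap_cons, h x (by simp)]
      rw [ih (fun z hz => h z (by simp [hz]))]

-- inserting x into the grouped concatenation when its key is one of the (strictly increasing) keys:
-- x lands at the end of its own group
theorem pv_ins_mem (k : Int → List Int) (F : List Int → List Int) (x : Int)
    (hF : ∀ d, ∀ y ∈ F d, k y = d) :
    ∀ ks : List (List Int), ks.Pairwise (· < ·) → k x ∈ ks →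
    PySem.List.insertBy (fun u v => decide (k u < k v)) x (ks.flatMap F)
      = ks.flatMap (fun d => if d = k x then F d ++ [x] else F d) := by
  intro ks
  induction ks with
  | nil => intro _ h; simp at h
  | cons d ks ih =>
      intro hp hc
      have hp' := (List.pairwise_cons.mp hp)
      by_cases hd : d = k x
      · subst hd
        rw [List.flatMap_cons,
          pv_insertBy_skip _ x (F (k x)) (ks.flatMap F)
            (fun y hy => by
              rw [hF (k x) y hy]
              simp),
          pv_insertBy_front _ x (ks.flatMap F)
            (fun y hy => by
              obtain ⟨d', hd', hyF⟩ := List.mem_flatMap.mp hy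
              rw [hF d' y hyF]
              simpa using hp'.1 d' hd'),
          List.flatMap_cons,
          show (if k x = k x then F (k x) ++ [x] else F (k x)) = F (k x) ++ [x] by simp,
          show ks.flatMap (fun e => if e = k x then F e ++ [x] else F e) = ks.flatMap F from
            pv_flatMap_congr (fun e he => by
              rw [if_neg]
              exact fun hed => pv_lt_irrefl (k x) (hed ▸ hp'.1 e he))]
        simp
      · have hcks : k x ∈ ks := by
          rcases List.mem_cons.mp hc with h | h
          · exact absurd h.symm hd
          · exact h
        have hdc : d < k x := hp'.1 _ hcks
        rw [List.flatMap_cons,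
          pv_insertBy_skip _ x (F d) (ks.flatMap F)
            (fun y hy => by
              rw [hF d y hy]
              simpa using pv_lt_asymm hdc),
          ih hp'.2 hcks, List.flatMap_cons, if_neg hd]

-- inserting x whose key is new: its one-element group lands where the key sorts
theorem pv_ins_not_mem (k : Int → List Int) (F : List Int → List Int) (x : Int)
    (hF : ∀ d, ∀ y ∈ F d, k y = d) (hFc : F (k x) = []) :
    ∀ ks : List (List Int), ks.Pairwise (· < ·) → k x ∉ ks →
    PySem.List.insertBy (fun u v => decide (k u < k v)) x (ks.flatMap F)
      = (PySem.List.insertBy (fun u v => decide (u < v)) (k x) ks).flatMap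
          (fun d => if d = k x then F d ++ [x] else F d) := by
  intro ks
  induction ks with
  | nil =>
      intro _ _
      simp [PySem.List.insertBy, hFc]
  | cons d ks ih =>
      intro hp hc
      have hp' := (List.pairwise_cons.mp hp)
      have hd : d ≠ k x := fun h => hc (h ▸ List.mem_cons_self ..)
      by_cases hlt : k x < d
      · rw [show PySem.List.insertBy (fun u v => decide (u < v)) (k x) (d :: ks)
              = k x :: d :: ks by simp [PySem.List.insertBy, hlt]]
        rw [pv_insertBy_front _ x ((d :: ks).flatMap F)
            (fun y hy => by
              obtain ⟨d', hd', hyF⟩ := List.mem_flatMap.mp hy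
              rw [hF d' y hyF]
              rcases List.mem_cons.mp hd' with h | h
              · simpa [h] using hlt
              · simpa using pv_lt_trans hlt (hp'.1 d' h))]
        rw [show (k x :: d :: ks).flatMap (fun e => if e = k x then F e ++ [x] else F e)
              = [x] ++ (d :: ks).flatMap F by
            rw [List.flatMap_cons,
              show (if k x = k x then F (k x) ++ [x] else F (k x)) = F (k x) ++ [x] by simp,
              hFc, List.nil_append,
              show (d :: ks).flatMap (fun e => if e = k x then F e ++ [x] else F e)
                  = (d :: ks).flatMap F from
                pv_flatMap_congr (fun e he => by
                  rw [if_neg]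
                  intro hek
                  rcases List.mem_cons.mp he with h | h
                  · exact hd (by rw [← h]; exact hek)
                  · exact pv_lt_asymm hlt (hek ▸ hp'.1 e h))]]
        simp
      · have hdlt : d < k x := by
          rcases pv_lt_total (Ne.symm hd) with h | h
          · exact absurd h hlt
          · exact h
        rw [show PySem.List.insertBy (fun u v => decide (u < v)) (k x) (d :: ks)
              = d :: PySem.List.insertBy (fun u v => decide (u < v)) (k x) ks by
            simp [PySem.List.insertBy, hlt]]
        rw [List.flatMap_cons,
          pv_insertBy_skip _ x (F d) (ks.flatMap F)
            (fun y hy => by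
              rw [hF d y hy]
              simpa using pv_lt_asymm hdlt),
          ih hp'.2 (fun h => hc (List.mem_cons_of_mem _ h)),
          List.flatMap_cons, if_neg hd]

-- the stable sort does not depend on which (equivalent) LT/Decidable instances compare the keys
theorem pv_sorted_congr {a k : Type} (i1 i2 : LT k) (d1 : DecidableRel (@LT.lt k i1))
    (d2 : DecidableRel (@LT.lt k i2)) (h : ∀ u v : k, @LT.lt k i1 u v ↔ @LT.lt k i2 u v)
    (l : List a) (key : a → k) :
    @PySem.List.sorted a k i1 d1 l key false = @PySem.List.sorted a k i2 d2 l key false := by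
  refine (@PySem.List.sorted_eq_foldl_insertBy a k i1 d1 l key).trans
    (Eq.trans ?_ (@PySem.List.sorted_eq_foldl_insertBy a k i2 d2 l key).symm)
  congr 1
  funext acc x
  congr 1
  funext u v
  exact decide_eq_decide.mpr (h (key u) (key v))

-- the sorted distinct keys are strictly increasing (in core's list order)
theorem pv_keys_pairwise (xs : List (List Int)) :
    (PySem.List.sorted (PySem.Set.ofList xs) (fun x => x)).Pairwise (· < ·) := by
  have hs := PySem.List.sorted_ofList_pairwise_lt xs
  rw [← pv_sorted_congr List.instLT _ inferInstance _ pv_listlt_iff _ _] at hs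
  exact hs.imp (fun h => (pv_listlt_iff _ _).mpr h)

-- STABLE SORT = GROUPED CONCATENATION: sorting l by key equals concatenating, over the distinct
-- keys in sorted order, the elements of l with that key in their original order
theorem pv_stable_group (k : Int → List Int) (l : List Int) :
    PySem.List.sorted l k =
      (PySem.List.sorted (PySem.Set.ofList (l.map k)) (fun x => x)).flatMap
        (fun c => l.filter (fun y => k y == c)) := by
  induction l using List.reverseRecOn with
  | nil => simp [PySem.List.sorted, PySem.Set.ofList]
  | append_singleton l x ih =>
      rw [pv_sorted_append_singleton, ih]
      have hF : ∀ d, ∀ y ∈ l.filter (fun y => k y == d), k y = d := by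
        intro d y hy
        simpa using (List.mem_filter.mp hy).2
      have hmap : (l ++ [x]).map k = l.map k ++ [k x] := by simp
      have hfilter : ∀ c, (l ++ [x]).filter (fun y => k y == c)
          = l.filter (fun y => k y == c) ++ (if c = k x then [x] else []) := by
        intro c
        rw [List.filter_append]
        congr 1
        simp only [List.filter_cons, List.filter_nil]
        by_cases h : c = k x
        · rw [if_pos (by rw [h]; exact beq_self_eq_true (k x)), if_pos h]
        · rw [if_neg (fun hb => h (eq_of_beq hb).symm), if_neg h]
      by_cases hc : k x ∈ l.map k
      · rw [hmap, PySem.Set.ofList_append_singleton, PySem.Set.add_of_mem ((PySem.Set.mem_ofList _ _).mpr hc)]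
        rw [pv_ins_mem k _ x hF _ (pv_keys_pairwise (l.map k))
              (by rw [PySem.List.mem_sorted]; exact (PySem.Set.mem_ofList _ _).mpr hc)]
        exact (pv_flatMap_congr (fun c _ => by
          rw [hfilter c]
          by_cases h : c = k x <;> simp [h])).symm
      · rw [hmap, PySem.Set.ofList_append_singleton, PySem.Set.add_of_not_mem (fun h => hc ((PySem.Set.mem_ofList _ _).mp h)),
          pv_sorted_append_singleton]
        have hFc : l.filter (fun y => k y == k x) = [] := by
          rw [List.filter_eq_nil_iff]
          intro y hy hbeq
          exact hc (by rw [← eq_of_beq hbeq]; exact List.mem_map_of_mem hy)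
        rw [pv_ins_not_mem k _ x hF hFc _ (pv_keys_pairwise (l.map k))
              (by rw [PySem.List.mem_sorted]; exact fun h => hc ((PySem.Set.mem_ofList _ _).mp h))]
        exact (pv_flatMap_congr (fun c _ => by
          rw [hfilter c]
          by_cases h : c = k x <;> simp [h])).symm

-- the three-accumulator append loop over one group
theorem pv_fold3_inner (ts : List (Int × Int × Int)) (acc : List Int × List Int × List Int) :
    ts.foldl (fun acc t => (acc.1 ++ [t.1], acc.2.1 ++ [t.2.1], acc.2.2 ++ [t.2.2])) acc
      = (acc.1 ++ ts.map (fun t => t.1), acc.2.1 ++ ts.map (fun t => t.2.1),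
         acc.2.2 ++ ts.map (fun t => t.2.2)) := by
  induction ts generalizing acc with
  | nil => simp
  | cons t ts ih => simp [ih]

-- the outer loop over the sorted keys concatenates the groups' columns
theorem pv_fold3_outer (G : List Int → List (Int × Int × Int)) (ks : List (List Int))
    (acc : List Int × List Int × List Int) :
    ks.foldl (fun acc kk => (G kk).foldl
        (fun acc t => (acc.1 ++ [t.1], acc.2.1 ++ [t.2.1], acc.2.2 ++ [t.2.2])) acc) acc
      = (acc.1 ++ ks.flatMap (fun kk => (G kk).map (fun t => t.1)),
         acc.2.1 ++ ks.flatMap (fun kk => (G kk).map (fun t => t.2.1)),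
         acc.2.2 ++ ks.flatMap (fun kk => (G kk).map (fun t => t.2.2))) := by
  induction ks generalizing acc with
  | nil => simp
  | cons kk ks ih =>
      rw [List.foldl_cons, ih, pv_fold3_inner]
      simp [List.append_assoc]

-- the grouping dict, read back: groups[c] is the rows whose key is c, in original order
theorem pv_groups_getD (r : List Int) (kI : Int → List Int) (val : Int → Int × Int × Int) (c : List Int) :
    (r.foldl (fun d i => d.modify (kI i) [] (fun xs => xs ++ [val i])) PySem.Dict.empty).getD c []
      = (r.filter (fun i => kI i == c)).map val := by
  have h : (r.map (fun i => (kI i, val i))).foldl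
        (fun d (p : List Int × (Int × Int × Int)) => d.modify p.1 [] (fun xs => xs ++ [p.2]))
        PySem.Dict.empty
      = r.foldl (fun d i => d.modify (kI i) [] (fun xs => xs ++ [val i])) PySem.Dict.empty := by
    rw [List.foldl_map]
  rw [← h, PySem.Dict.getD_foldl_modify_append, PySem.Dict.getD_empty, List.filter_map,
      List.map_map]
  rfl

-- the grouping dict's keys are the distinct key triples in first-occurrence order
theorem pv_groups_keys (r : List Int) (kI : Int → List Int) (val : Int → Int × Int × Int) :
    (r.foldl (fun d i => d.modify (kI i) [] (fun xs => xs ++ [val i])) PySem.Dict.empty).keys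
      = PySem.Set.ofList (r.map kI) := by
  rw [PySem.Dict.keys_foldl_modify_key r kI [] (fun d i => fun xs => xs ++ [val i]) PySem.Dict.empty,
      PySem.Dict.keys_empty, PySem.Set.update_nil_left]

theorem pv_main (pair1 pair2 pair3 : List Int × List Int) :
    sort_list_pairs pair1 pair2 pair3 = sort_list_pairs_alt pair1 pair2 pair3 := by
  obtain ⟨l1a, l1b⟩ := pair1
  obtain ⟨l2a, l2b⟩ := pair2
  obtain ⟨l3a, l3b⟩ := pair3
  unfold sort_list_pairs sort_list_pairs_alt
  simp only [pv_groups_keys, pv_groups_getD, pv_fold3_outer,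
    pv_stable_group (fun i => [PySem.List.pyGetD l1b i 0, PySem.List.pyGetD l2b i 0, PySem.List.pyGetD l3b i 0])
      (PySem.List.pyRange 0 (PySem.List.len l1b))]
  simp [List.map_flatMap, List.map_map, Function.comp_def]

-- ===== VERDICT (by name: the statement is the Claim_ definition above) =====
theorem sort_list_pairs_spec : Claim_equal_sort_list_pairs := by
  intro pair1 pair2 pair3 _ _
  unfold Spec_sort_list_pairs
  exact pv_main pair1 pair2 pair3
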